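-- pv_equiv track=rewrite | github.com/eriosgamer/NPM-Stream-Maker | Port_Scanner.py | expandir_instancias_por_rango
-- ===== SOURCE A (Python) =====
-- def expandir_instancias_por_rango(ranges, max_instances=5):
--     """
--     Given a list of ranges [(start, end)], expand up to max_instances consecutive blocks.
--     Example: [(12000,12005)] -> [12000,12001,...,12005,12006,12007,...,12011,...]
--     """
--     ports = set()
--     used = set()
--     for start, end in ranges:
--         range_len = end - start + 1
--         for i in range(max_instances):
--             block_start = start + i * range_len
--             block_end = block_start + range_len - 1
--             block = set(range(block_start, block_end + 1))
--             # Avoid overlaps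
--             if not block & used:
--                 ports.update(block)
--                 used.update(block)
--     return ports
-- ===== SOURCE B (Python) =====
-- def expandir_instancias_por_rango(ranges, max_instances=5):
--     """
--     Same result as A, but bookkeeping is a list of non-overlapping intervals:
--     each candidate block is tested by interval-overlap arithmetic instead of
--     materializing and intersecting element sets, and a block adjacent to the
--     last accepted interval is coalesced into it, so consecutive blocks of a
--     range occupy a single interval.
--     """
--     intervals = []   # accepted blocks, coalesced when adjacent; each (s, e) with s <= e
--     result = []      # concatenation of accepted blocks, in acceptance order
--     for start, end in ranges:
--         range_len = end - start + 1
--         for i in range(max_instances):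
--             bs = start + i * range_len
--             be = bs + range_len - 1
--             if bs <= be and all(not (bs <= e and s <= be) for (s, e) in intervals):
--                 if intervals and intervals[-1][1] + 1 == bs:
--                     intervals[-1] = (intervals[-1][0], be)
--                 else:
--                     intervals.append((bs, be))
--                 result.extend(range(bs, be + 1))
--     return set(result)
-- ===== Notes on version B (the rewrite author's own statement) =====
-- stated objective: faster
-- what changed: B keeps the allocated ports as a list of non-overlapping intervals (coalescing a block adjacent to the last interval into it) and tests each candidate block with interval-overlap arithmetic, instead of materializing each block as an element set and intersecting sets; the result is the concatenation of accepted blocks.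
import Mathlib
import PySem

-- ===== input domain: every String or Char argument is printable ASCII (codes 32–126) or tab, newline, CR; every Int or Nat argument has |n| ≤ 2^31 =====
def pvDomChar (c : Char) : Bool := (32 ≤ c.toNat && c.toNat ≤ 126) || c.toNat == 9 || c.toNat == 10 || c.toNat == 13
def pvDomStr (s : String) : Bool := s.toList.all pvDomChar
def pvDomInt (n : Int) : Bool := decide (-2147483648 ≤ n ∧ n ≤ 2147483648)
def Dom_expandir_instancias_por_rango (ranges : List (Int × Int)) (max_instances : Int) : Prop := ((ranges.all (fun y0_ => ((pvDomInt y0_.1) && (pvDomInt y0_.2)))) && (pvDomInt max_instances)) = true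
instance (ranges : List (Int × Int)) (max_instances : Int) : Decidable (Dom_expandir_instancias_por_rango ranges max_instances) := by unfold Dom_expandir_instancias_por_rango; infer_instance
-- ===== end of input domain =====

-- B replaces A's per-block element-set intersection by interval-overlap arithmetic
-- over a list of accepted non-overlapping intervals (objective: faster per-block check).

-- ===== PORT A =====
-- inner loop body of A: one candidate block, checked/added via element sets
def pvAinner (start range_len : Int) (st : PySem.Set Int × PySem.Set Int) (i : Int) :
    PySem.Set Int × PySem.Set Int :=
  let block_start := start + i * range_len
  let block_end := block_start + range_len - 1
  let block : PySem.Set Int := PySem.Set.ofList (PySem.List.pyRange block_start (block_end + 1) 1)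
  if PySem.Set.inter block st.2 = [] then
    (PySem.Set.update st.1 block, PySem.Set.update st.2 block)
  else st

def expandir_instancias_por_rango (ranges : List (Int × Int)) (max_instances : Int) : List Int :=
  (ranges.foldl
    (fun st r =>
      let range_len := r.2 - r.1 + 1
      (PySem.List.pyRange 0 max_instances 1).foldl (pvAinner r.1 range_len) st)
    ((PySem.Set.empty : PySem.Set Int), (PySem.Set.empty : PySem.Set Int))).1

-- ===== PORT B =====
-- inner loop body of B: one candidate block, checked by interval arithmetic
def pvBinner (start range_len : Int) (st : List (Int × Int) × List Int) (i : Int) :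
    List (Int × Int) × List Int :=
  let bs := start + i * range_len
  let be := bs + range_len - 1
  if bs ≤ be ∧ (st.1.all fun p => decide (¬(bs ≤ p.2 ∧ p.1 ≤ be))) then
    let ivs := match st.1.getLast? with
      | some (s, e) =>
          if e + 1 = bs then st.1.dropLast ++ [(s, be)] else st.1 ++ [(bs, be)]
      | none => st.1 ++ [(bs, be)]
    (ivs, st.2 ++ PySem.List.pyRange bs (be + 1) 1)
  else st

def expandir_instancias_por_rango_alt (ranges : List (Int × Int)) (max_instances : Int) : List Int :=
  let st := ranges.foldl
    (fun st r =>
      let range_len := r.2 - r.1 + 1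
      (PySem.List.pyRange 0 max_instances 1).foldl (pvBinner r.1 range_len) st)
    (([] : List (Int × Int)), ([] : List Int))
  PySem.Set.ofList st.2

-- ===== PRECONDITION & SPEC =====
def Spec_expandir_instancias_por_rango (ranges : List (Int × Int)) (max_instances : Int) (out : List Int) : Prop := out = expandir_instancias_por_rango_alt ranges max_instances
instance (ranges : List (Int × Int)) (max_instances : Int) (out : List Int) : Decidable (Spec_expandir_instancias_por_rango ranges max_instances out) := by unfold Spec_expandir_instancias_por_rango; infer_instance

-- ===== CLAIM (what is proved, stated in full; the proofs are below) =====
def Claim_equal_expandir_instancias_por_rango : Prop := ∀ (ranges : List (Int × Int)) (max_instances : Int), Dom_expandir_instancias_por_rango ranges max_instances → Spec_expandir_instancias_por_rango ranges max_instances (expandir_instancias_por_rango ranges max_instances)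

-- ===== LEMMAS AND PROOFS =====

-- Relation between A's state (ports, used) and B's state (intervals, result):
-- ports = used = result as lists; result is duplicate-free; membership in result is
-- exactly membership in one of the intervals; every interval is nonempty.
def pvInv (a : PySem.Set Int × PySem.Set Int) (b : List (Int × Int) × List Int) : Prop :=
  a.1 = b.2 ∧ a.2 = b.2 ∧ b.2.Nodup ∧
  (∀ x : Int, x ∈ b.2 ↔ ∃ p ∈ b.1, p.1 ≤ x ∧ x ≤ p.2) ∧
  (∀ p ∈ b.1, p.1 ≤ p.2)

lemma pvInner_step (start L i : Int) (a : PySem.Set Int × PySem.Set Int)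
    (b : List (Int × Int) × List Int) (h : pvInv a b) :
    pvInv (pvAinner start L a i) (pvBinner start L b i) := by
  obtain ⟨h1, h2, h3, h4, h5⟩ := h
  simp only [pvAinner, pvBinner]
  set bs := start + i * L with hbs
  set be := bs + L - 1 with hbe
  by_cases hle : bs ≤ be
  · -- nonempty candidate block
    have hR : PySem.Set.ofList (PySem.List.pyRange bs (be + 1) 1)
        = PySem.List.pyRange bs (be + 1) 1 :=
      PySem.Set.ofList_eq_self_of_nodup _ (PySem.List.nodup_pyRange_one ..)
    have hmemR : ∀ x : Int, x ∈ PySem.List.pyRange bs (be + 1) 1 ↔ bs ≤ x ∧ x < be + 1 :=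
      fun x => PySem.List.mem_pyRange_one
    -- A's acceptance condition ↔ B's acceptance condition
    have hcond : (PySem.Set.inter (PySem.Set.ofList (PySem.List.pyRange bs (be + 1) 1)) a.2 = [])
        ↔ (bs ≤ be ∧ (b.1.all fun p => decide (¬(bs ≤ p.2 ∧ p.1 ≤ be)))) := by
      rw [hR, List.eq_nil_iff_forall_not_mem]
      constructor
      · intro hA
        refine ⟨hle, ?_⟩
        rw [List.all_eq_true]
        intro p hp
        simp only [decide_eq_true_eq]
        rintro ⟨hp1, hp2⟩
        have hne := h5 p hp
        have hx := hA (max bs p.1)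
        rw [PySem.Set.mem_inter, hmemR, h2, h4] at hx
        exact hx ⟨⟨le_max_left _ _, by omega⟩, p, hp, le_max_right _ _, by omega⟩
      · rintro ⟨-, hall⟩ x hx
        rw [List.all_eq_true] at hall
        rw [PySem.Set.mem_inter, hmemR, h2, h4] at hx
        obtain ⟨⟨hx1, hx2⟩, p, hp, hpl, hpr⟩ := hx
        have := hall p hp
        simp only [decide_eq_true_eq] at this
        exact this ⟨by omega, by omega⟩
    by_cases hacc : PySem.Set.inter (PySem.Set.ofList (PySem.List.pyRange bs (be + 1) 1)) a.2 = []
    · -- both accept the block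
      rw [if_pos hacc, if_pos (hcond.mp hacc)]
      have hdisj : ∀ x ∈ PySem.List.pyRange bs (be + 1) 1, x ∉ b.2 := by
        intro x hx hxb
        rw [List.eq_nil_iff_forall_not_mem] at hacc
        exact hacc x (by rw [PySem.Set.mem_inter, hR]; exact ⟨hx, h2 ▸ hxb⟩)
      have hupd : ∀ s : PySem.Set Int, s = b.2 →
          PySem.Set.update s (PySem.Set.ofList (PySem.List.pyRange bs (be + 1) 1))
            = b.2 ++ PySem.List.pyRange bs (be + 1) 1 := by
        intro s hs
        rw [hR, PySem.Set.update_eq_append_of_disjoint _ _ (PySem.List.nodup_pyRange_one ..)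
          (fun x hx => hs ▸ hdisj x hx), hs]
      -- any interval list whose union is (union of b.1) ∪ [bs, be] closes the invariant
      have hfin : ∀ ivs : List (Int × Int), (∀ p ∈ ivs, p.1 ≤ p.2) →
          (∀ x : Int, (∃ p ∈ ivs, p.1 ≤ x ∧ x ≤ p.2) ↔
            (∃ p ∈ b.1, p.1 ≤ x ∧ x ≤ p.2) ∨ (bs ≤ x ∧ x ≤ be)) →
          pvInv (PySem.Set.update a.1 (PySem.Set.ofList (PySem.List.pyRange bs (be + 1) 1)),
                 PySem.Set.update a.2 (PySem.Set.ofList (PySem.List.pyRange bs (be + 1) 1)))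
                (ivs, b.2 ++ PySem.List.pyRange bs (be + 1) 1) := by
        intro ivs hne hu
        refine ⟨hupd a.1 h1, hupd a.2 h2, ?_, ?_, hne⟩
        · exact List.Nodup.append h3 (PySem.List.nodup_pyRange_one ..)
            (List.disjoint_right.mpr hdisj)
        · intro x
          rw [hu x]
          simp only [List.mem_append, hmemR, h4]
          constructor
          · rintro (h | h)
            · exact Or.inl h
            · exact Or.inr (by omega)
          · rintro (h | h)
            · exact Or.inl h
            · exact Or.inr (by omega)
      -- union fact for appending the fresh interval
      have happ : ∀ x : Int, (∃ p ∈ b.1 ++ [(bs, be)], p.1 ≤ x ∧ x ≤ p.2) ↔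
          (∃ p ∈ b.1, p.1 ≤ x ∧ x ≤ p.2) ∨ (bs ≤ x ∧ x ≤ be) := by
        intro x
        constructor
        · rintro ⟨p, hp, hx⟩
          rcases List.mem_append.mp hp with hp | hp
          · exact Or.inl ⟨p, hp, hx⟩
          · rw [List.mem_singleton] at hp; subst hp; exact Or.inr hx
        · rintro (⟨p, hp, hx⟩ | hx)
          · exact ⟨p, List.mem_append_left _ hp, hx⟩
          · exact ⟨(bs, be), List.mem_append_right _ (List.mem_singleton.mpr rfl), hx⟩
      have hneapp : ∀ p ∈ b.1 ++ [(bs, be)], p.1 ≤ p.2 := by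
        intro p hp
        rcases List.mem_append.mp hp with hp | hp
        · exact h5 p hp
        · rw [List.mem_singleton] at hp; subst hp; exact hle
      cases hlast : b.1.getLast? with
      | none => exact hfin _ hneapp happ
      | some q =>
        obtain ⟨s, e⟩ := q
        dsimp only
        by_cases hadj : e + 1 = bs
        · rw [if_pos hadj]
          obtain ⟨l', hl⟩ := List.getLast?_eq_some_iff.mp hlast
          have hse : s ≤ e := h5 (s, e) (hl ▸ List.mem_append_right _ (List.mem_singleton.mpr rfl))
          have hdrop : b.1.dropLast = l' := by rw [hl, List.dropLast_concat]
          refine hfin _ ?_ ?_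
          · intro p hp
            rcases List.mem_append.mp hp with hp | hp
            · have hp' : p ∈ l' := hdrop ▸ hp
              exact h5 p (hl ▸ List.mem_append_left _ hp')
            · rw [List.mem_singleton] at hp; subst hp; dsimp only; omega
          · intro x
            rw [hdrop]
            constructor
            · rintro ⟨p, hp, hx⟩
              rcases List.mem_append.mp hp with hp | hp
              · exact Or.inl ⟨p, hl ▸ List.mem_append_left _ hp, hx⟩
              · rw [List.mem_singleton] at hp; subst hp
                have hx1 : s ≤ x := hx.1
                have hx2 : x ≤ be := hx.2
                by_cases hxe : x ≤ e
                · exact Or.inl ⟨(s, e),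
                    hl ▸ List.mem_append_right _ (List.mem_singleton.mpr rfl), hx1, hxe⟩
                · exact Or.inr ⟨by omega, hx2⟩
            · rintro (⟨p, hp, hx⟩ | hx)
              · rw [hl] at hp
                rcases List.mem_append.mp hp with hp | hp
                · exact ⟨p, List.mem_append_left _ hp, hx⟩
                · rw [List.mem_singleton] at hp; subst hp
                  have hx1 : s ≤ x := hx.1
                  have hx2 : x ≤ e := hx.2
                  exact ⟨(s, be), List.mem_append_right _ (List.mem_singleton.mpr rfl),
                    hx1, by omega⟩
              · have hx1 : bs ≤ x := hx.1
                have hx2 : x ≤ be := hx.2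
                exact ⟨(s, be), List.mem_append_right _ (List.mem_singleton.mpr rfl),
                  by omega, hx2⟩
        · rw [if_neg hadj]
          exact hfin _ hneapp happ
    · -- both reject the block
      rw [if_neg hacc, if_neg (fun hB => hacc (hcond.mpr hB))]
      exact ⟨h1, h2, h3, h4, h5⟩
  · -- empty candidate block: A accepts it but adds nothing, B skips; state unchanged
    have hRnil : PySem.List.pyRange bs (be + 1) 1 = [] := by
      rw [PySem.List.pyRange_one]
      have : (be + 1 - bs).toNat = 0 := by omega
      rw [this]; rfl
    rw [hRnil]
    have : (PySem.Set.inter (PySem.Set.ofList ([] : List Int)) a.2) = [] := rfl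
    rw [if_pos this, if_neg (by intro hB; exact hle hB.1)]
    exact ⟨by simpa [PySem.Set.update_nil] using h1, by simpa [PySem.Set.update_nil] using h2,
      h3, h4, h5⟩

lemma pvInner_fold (is : List Int) (start L : Int) (a : PySem.Set Int × PySem.Set Int)
    (b : List (Int × Int) × List Int) (h : pvInv a b) :
    pvInv (is.foldl (pvAinner start L) a) (is.foldl (pvBinner start L) b) := by
  induction is generalizing a b with
  | nil => exact h
  | cons i is ih => exact ih _ _ (pvInner_step start L i a b h)

lemma pvOuter_fold (rs : List (Int × Int)) (m : Int) (a : PySem.Set Int × PySem.Set Int)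
    (b : List (Int × Int) × List Int) (h : pvInv a b) :
    pvInv (rs.foldl (fun st r =>
        (PySem.List.pyRange 0 m 1).foldl (pvAinner r.1 (r.2 - r.1 + 1)) st) a)
      (rs.foldl (fun st r =>
        (PySem.List.pyRange 0 m 1).foldl (pvBinner r.1 (r.2 - r.1 + 1)) st) b) := by
  induction rs generalizing a b with
  | nil => exact h
  | cons r rs ih => exact ih _ _ (pvInner_fold _ _ _ _ _ h)

-- ===== VERDICT (by name: the statement is the Claim_ definition above) =====
theorem expandir_instancias_por_rango_spec : Claim_equal_expandir_instancias_por_rango := by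
  intro ranges max_instances _
  unfold Spec_expandir_instancias_por_rango expandir_instancias_por_rango
    expandir_instancias_por_rango_alt
  have h0 : pvInv ((PySem.Set.empty : PySem.Set Int), (PySem.Set.empty : PySem.Set Int))
      (([] : List (Int × Int)), ([] : List Int)) := by
    refine ⟨rfl, rfl, List.nodup_nil, ?_, ?_⟩ <;> simp
  have h := pvOuter_fold ranges max_instances _ _ h0
  obtain ⟨h1, -, h3, -, -⟩ := h
  simp only at h1 h3 ⊢
  rw [h1, PySem.Set.ofList_eq_self_of_nodup _ h3]
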